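-- pv_equiv track=rewrite | github.com/focs-lab/rapid | generateMetaInfo.py | getThreadsLen
-- ===== SOURCE A (Python) =====
-- def getThreadsLen(threads):
--     length = len(threads)
--     ret = []
--
--     for i in range(length):
--         for key in threads:
--             if(threads[key][0] == i):
--                 ret.append(threads[key][1])
--
--     return ret
-- ===== SOURCE B (Python) =====
-- def getThreadsLen(threads):
--     # One pass: bucket each thread's length by its index, then emit buckets in index order.
--     n = len(threads)
--     buckets = {}
--     for v in threads.values():
--         if 0 <= v[0] < n:
--             buckets.setdefault(v[0], []).append(v[1])
--     ret = []
--     for i in range(n):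
--         ret += buckets.get(i, [])
--     return ret
-- ===== Notes on version B (the rewrite author's own statement) =====
-- stated objective: faster
-- what changed: A rescans the whole dict once per index (nested loops); B makes a single bucketing pass grouping each thread's length under its index, then emits the buckets in index order.
import Mathlib
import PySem

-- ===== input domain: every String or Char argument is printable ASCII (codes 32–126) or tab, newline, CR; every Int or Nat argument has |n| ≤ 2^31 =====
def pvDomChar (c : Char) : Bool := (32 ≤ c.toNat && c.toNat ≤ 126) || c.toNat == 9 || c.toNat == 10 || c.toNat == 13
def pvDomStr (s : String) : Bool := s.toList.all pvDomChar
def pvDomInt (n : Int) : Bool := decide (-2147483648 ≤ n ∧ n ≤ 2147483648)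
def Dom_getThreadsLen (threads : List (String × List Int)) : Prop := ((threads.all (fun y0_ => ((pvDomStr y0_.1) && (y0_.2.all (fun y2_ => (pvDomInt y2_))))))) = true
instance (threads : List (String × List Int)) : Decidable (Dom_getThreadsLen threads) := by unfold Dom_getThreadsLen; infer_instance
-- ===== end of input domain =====

-- B replaces A's O(n^2) nested rescan of the dict by a single bucketing pass plus an in-order emit (asymptotically faster).

-- ===== PORT A =====
-- A: for i in range(len(threads)): for key in threads: if threads[key][0] == i: ret.append(threads[key][1])
def getThreadsLen (threads : List (String × List Int)) : List Int :=
  let length : Int := threads.length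
  (PySem.List.pyRange 0 length 1).foldl
    (fun ret i =>
      (PySem.Dict.mk threads).keys.foldl
        (fun ret key =>
          if PySem.List.pyGetD ((PySem.Dict.mk threads).getD key []) 0 0 == i then
            ret ++ [PySem.List.pyGetD ((PySem.Dict.mk threads).getD key []) 1 0]
          else ret)
        ret)
    []

-- ===== PORT B =====
-- B: one pass over threads.values() bucketing v[1] under v[0] (setdefault+append = Dict.modify),
-- then one pass over range(n) concatenating the buckets.
def getThreadsLen_alt (threads : List (String × List Int)) : List Int :=
  let n : Int := threads.length
  let buckets : PySem.Dict Int (List Int) :=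
    (threads.map (fun p => p.2)).foldl
      (fun b v =>
        if 0 ≤ PySem.List.pyGetD v 0 0 && PySem.List.pyGetD v 0 0 < n then
          b.modify (PySem.List.pyGetD v 0 0) [] (fun l => l ++ [PySem.List.pyGetD v 1 0])
        else b)
      PySem.Dict.empty
  (PySem.List.pyRange 0 n 1).foldl (fun ret i => ret ++ buckets.getD i []) []

-- ===== PRECONDITION & SPEC =====
-- Pre_ excludes exactly the inputs where Python A raises IndexError: a value list v with no
-- elements, or a one-element v whose index v[0] lies in range(len(threads)) (then threads[key][1] is read).
-- The Nodup conjunct only rules out association lists that no Python dict can represent.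
def Pre_getThreadsLen (threads : List (String × List Int)) : Prop :=
  (threads.map (fun p => p.1)).Nodup ∧
  ∀ p ∈ threads, p.2 ≠ [] ∧
    ((0 ≤ p.2.headI ∧ p.2.headI < (threads.length : Int)) → 2 ≤ p.2.length)
instance (threads : List (String × List Int)) : Decidable (Pre_getThreadsLen threads) := by
  unfold Pre_getThreadsLen; infer_instance

def pvWitness_getThreadsLen : (List (String × List Int)) := [("a", [1, 5]), ("b", [0, 7])]

def Spec_getThreadsLen (threads : List (String × List Int)) (out : List Int) : Prop := out = getThreadsLen_alt threads
instance (threads : List (String × List Int)) (out : List Int) : Decidable (Spec_getThreadsLen threads out) := by unfold Spec_getThreadsLen; infer_instance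

-- ===== CLAIM (what is proved, stated in full; the proofs are below) =====
def Claim_equal_getThreadsLen : Prop := ∀ (threads : List (String × List Int)), Dom_getThreadsLen threads → Pre_getThreadsLen threads → Spec_getThreadsLen threads (getThreadsLen threads)

-- ===== LEMMAS AND PROOFS =====

-- The common normal form: for each index i, the lengths of the threads whose index field is i.
def pvEmit (threads : List (String × List Int)) (i : Int) : List Int :=
  ((threads.map (fun p => p.2)).filter (fun v => PySem.List.pyGetD v 0 0 == i)).map
    (fun v => PySem.List.pyGetD v 1 0)

-- A's inner scan over the dict's keys, under unique keys, collects exactly pvEmit threads i.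
theorem pvA_inner (threads : List (String × List Int))
    (hnd : (threads.map (fun p => p.1)).Nodup) (i : Int) (ret : List Int) :
    (PySem.Dict.mk threads).keys.foldl
      (fun ret key =>
        if PySem.List.pyGetD ((PySem.Dict.mk threads).getD key []) 0 0 == i then
          ret ++ [PySem.List.pyGetD ((PySem.Dict.mk threads).getD key []) 1 0]
        else ret)
      ret = ret ++ pvEmit threads i := by
  rw [PySem.Dict.keys_mk, List.foldl_map]
  rw [PySem.List.foldl_congr_mem _ _
    (fun ret p => if PySem.List.pyGetD p.2 0 0 == i then
        ret ++ [PySem.List.pyGetD p.2 1 0] else ret) ret ?_]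
  · rw [PySem.List.foldl_append_if (fun p => PySem.List.pyGetD p.2 0 0 == i)
      (fun p => PySem.List.pyGetD p.2 1 0) threads ret]
    unfold pvEmit
    rw [List.filter_map, List.map_map]
    rfl
  · intro acc p hp
    have hget : (PySem.Dict.mk threads).getD p.1 [] = p.2 :=
      PySem.Dict.getD_of_mem_items _ (by simpa using hp) (by simpa using hnd) []
    rw [hget]

-- B's bucket at an in-range i holds exactly pvEmit threads i.
theorem pvB_bucket (threads : List (String × List Int)) (i : Int)
    (h0 : 0 ≤ i) (hn : i < (threads.length : Int)) :
    ((threads.map (fun p => p.2)).foldl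
      (fun b v =>
        if 0 ≤ PySem.List.pyGetD v 0 0 && PySem.List.pyGetD v 0 0 < (threads.length : Int) then
          b.modify (PySem.List.pyGetD v 0 0) [] (fun l => l ++ [PySem.List.pyGetD v 1 0])
        else b)
      PySem.Dict.empty).getD i [] = pvEmit threads i := by
  have hff := @List.foldl_filter (List Int) (PySem.Dict Int (List Int))
    (fun v => decide (0 ≤ PySem.List.pyGetD v 0 0) && decide (PySem.List.pyGetD v 0 0 < (threads.length : Int)))
    (fun b v => b.modify (PySem.List.pyGetD v 0 0) [] (fun l => l ++ [PySem.List.pyGetD v 1 0]))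
    (threads.map (fun p => p.2)) PySem.Dict.empty
  simp only [← hff]
  have hfm := @List.foldl_map (List Int) (Int × Int) (PySem.Dict Int (List Int))
    (fun v => (PySem.List.pyGetD v 0 0, PySem.List.pyGetD v 1 0))
    (fun b p => b.modify p.1 [] (fun l => l ++ [p.2]))
    ((threads.map (fun p => p.2)).filter
      (fun v => decide (0 ≤ PySem.List.pyGetD v 0 0) && decide (PySem.List.pyGetD v 0 0 < (threads.length : Int))))
    PySem.Dict.empty
  simp only [← hfm]
  rw [PySem.Dict.getD_foldl_modify_append]
  rw [PySem.Dict.getD_empty, List.nil_append, List.filter_map, List.map_map,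
      List.filter_filter]
  unfold pvEmit
  congr 1
  apply List.filter_congr
  intro v _
  simp only [Function.comp]
  by_cases hv : PySem.List.pyGetD v 0 0 = i
  · simp [hv, h0, hn]
  · simp [hv]

-- ===== VERDICT (by name: the statement is the Claim_ definition above) =====
theorem getThreadsLen_spec : Claim_equal_getThreadsLen := by
  intro threads _ hpre
  unfold Spec_getThreadsLen getThreadsLen getThreadsLen_alt
  rw [PySem.List.foldl_congr_mem _ _ (fun ret i => ret ++ pvEmit threads i) [] ?_]
  · rw [PySem.List.foldl_congr_mem _
      (fun ret i => ret ++ ((threads.map (fun p => p.2)).foldl _ PySem.Dict.empty).getD i [])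
      (fun ret i => ret ++ pvEmit threads i) [] ?_]
    intro acc i hi
    rw [PySem.List.mem_pyRange_one] at hi
    simp only [pvB_bucket threads i hi.1 hi.2]
  · intro acc i _
    rw [pvA_inner threads hpre.1 i acc]
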